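-- pv_equiv track=rewrite | github.com/YashB63/GFG-Daily-Questions | Day 561/String Conversion/string_conversion.py | stringConversion
-- ===== SOURCE A (Python) =====
-- def stringConversion(X, Y):
--     n = len(X)
--     m = len(Y)
--
--     dp = [[0 for _ in range(m + 1)] for _ in range(n + 1)]
--
--     dp[0][0] = 1
--
--     for i in range(n):
--         for j in range(m + 1):
--             if dp[i][j]:
--                 if j < m and X[i].upper() == Y[j]:
--                     dp[i + 1][j + 1] = 1
--                 if not X[i].isupper():
--                     dp[i + 1][j] = 1
--
--     return dp[n][m]
-- ===== SOURCE B (Python) =====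
-- def stringConversion(X, Y):
--     n, m = len(X), len(Y)
--     memo = {}
--
--     def f(i, j):
--         # 1 iff X[i:] can be converted to Y[j:]
--         if i == n:
--             return 1 if j == m else 0
--         key = (i, j)
--         if key not in memo:
--             r = 0
--             if j < m and X[i].upper() == Y[j]:
--                 r = f(i + 1, j + 1)
--             if not r and not X[i].isupper():
--                 r = f(i + 1, j)
--             memo[key] = r
--         return memo[key]
--
--     return f(0, 0)
-- ===== Notes on version B (the rewrite author's own statement) =====
-- stated objective: alternative
-- what changed: Replaces A's forward-filled (n+1)x(m+1) reachability table (seeded at dp[0][0], propagated by nested loops, read at dp[n][m]) with a top-down memoized recursion f(i,j) = 'X[i:] converts to Y[j:]' with short-circuiting, answering f(0,0).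
import Mathlib
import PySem

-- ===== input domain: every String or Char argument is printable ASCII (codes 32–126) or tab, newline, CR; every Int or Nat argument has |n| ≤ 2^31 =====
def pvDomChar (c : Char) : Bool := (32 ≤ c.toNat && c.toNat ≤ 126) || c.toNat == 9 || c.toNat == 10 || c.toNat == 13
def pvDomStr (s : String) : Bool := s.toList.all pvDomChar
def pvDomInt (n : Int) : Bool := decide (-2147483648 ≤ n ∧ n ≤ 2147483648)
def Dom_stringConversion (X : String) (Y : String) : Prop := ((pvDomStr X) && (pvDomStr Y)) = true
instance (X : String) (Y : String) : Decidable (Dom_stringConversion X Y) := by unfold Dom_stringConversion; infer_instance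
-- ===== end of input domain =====

-- B replaces A's forward-filled reachability table with a top-down memoized recursion f(i,j) on suffixes (objective: alternative).

-- ===== PORT A =====
-- dp[i][j] := v on a list-of-lists table (Python's nested list assignment)
def convUpd (dp : List (List Int)) (i j : Nat) (v : Int) : List (List Int) :=
  dp.set i ((dp.getD i []).set j v)

def stringConversion (X : String) (Y : String) : Int :=
  let xs := X.toList
  let ys := Y.toList
  let n := xs.length
  let m := ys.length
  let dp0 := List.replicate (n + 1) (List.replicate (m + 1) (0 : Int))
  let dp1 := convUpd dp0 0 0 1
  let dpf := (List.range n).foldl (fun dp i =>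
    (List.range (m + 1)).foldl (fun dp j =>
      if (dp.getD i []).getD j 0 ≠ 0 then
        let dp' := if decide (j < m) && (PySem.Chars.upperChar (xs.getD i ' ') == ys.getD j ' ')
                   then convUpd dp (i + 1) (j + 1) 1 else dp
        if !PySem.Chars.isupper (xs.getD i ' ') then convUpd dp' (i + 1) j 1 else dp'
      else dp) dp) dp1
  (dpf.getD n []).getD m 0

-- ===== PORT B =====
-- Source B's helper f(i, j) (memoization is pure caching and does not change the value; the
-- remaining suffix X[i:] is carried as a list, so 'i == n' is the [] case): r is first set
-- from the match branch, and the skip branch runs only if r stayed 0 and X[i] is not upper.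
def bRec (ys : List Char) : List Char → Nat → Int
  | [], j => if j == ys.length then 1 else 0
  | c :: rest, j =>
    let r := if decide (j < ys.length) && (PySem.Chars.upperChar c == ys.getD j ' ')
             then bRec ys rest (j + 1) else 0
    if r == 0 && !PySem.Chars.isupper c then bRec ys rest j else r

def stringConversion_alt (X : String) (Y : String) : Int :=
  bRec Y.toList X.toList 0

-- ===== PRECONDITION & SPEC =====
def Spec_stringConversion (X : String) (Y : String) (out : Int) : Prop := out = stringConversion_alt X Y
instance (X : String) (Y : String) (out : Int) : Decidable (Spec_stringConversion X Y out) := by unfold Spec_stringConversion; infer_instance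

-- ===== CLAIM (what is proved, stated in full; the proofs are below) =====
def Claim_equal_stringConversion : Prop := ∀ (X : String) (Y : String), Dom_stringConversion X Y → Spec_stringConversion X Y (stringConversion X Y)

-- ===== LEMMAS AND PROOFS =====

-- suffix convertibility (the recursion both programs compute): altF xs' ys' ↔ xs' converts to ys'
def altF (xs ys : List Char) : Bool :=
  match xs with
  | [] => ys.isEmpty
  | c :: xs' =>
    (match ys with
     | d :: ys' => (PySem.Chars.upperChar c == d) && altF xs' ys'
     | [] => false)
    || (!PySem.Chars.isupper c && altF xs' ys)

-- forward reachability: Rb xs ys i j ↔ A's dp[i][j] ends up 1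
def Rb (xs ys : List Char) : Nat → Nat → Bool
  | 0, j => j == 0
  | (i+1), j =>
    (decide (1 ≤ j) && decide (j - 1 < ys.length)
      && (PySem.Chars.upperChar (xs.getD i ' ') == ys.getD (j - 1) ' ') && Rb xs ys i (j - 1))
    || (!PySem.Chars.isupper (xs.getD i ' ') && Rb xs ys i j)

-- partially built row i+1, after inner-loop columns < t of row i have been processed
def Pr (xs ys : List Char) (i t b : Nat) : Bool :=
  (decide (1 ≤ b) && decide (b - 1 < t) && decide (b - 1 < ys.length)
    && (PySem.Chars.upperChar (xs.getD i ' ') == ys.getD (b - 1) ' ') && Rb xs ys i (b - 1))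
  || (decide (b < t) && !PySem.Chars.isupper (xs.getD i ' ') && Rb xs ys i b)

def tab (n m : Nat) (f : Nat → Nat → Int) : List (List Int) :=
  (List.range (n + 1)).map (fun a => (List.range (m + 1)).map (f a))

-- dp state during A's loops: rows ≤ i final, row i+1 partial at threshold t, rest zero
def Fst (xs ys : List Char) (i t : Nat) (a b : Nat) : Int :=
  if a ≤ i then (if Rb xs ys a b then 1 else 0)
  else if a = i + 1 then (if Pr xs ys i t b then 1 else 0) else 0

theorem getD_tab (n m : Nat) (f : Nat → Nat → Int) (a b : Nat) (ha : a ≤ n) (hb : b ≤ m) :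
    ((tab n m f).getD a []).getD b 0 = f a b := by
  have ha' : a < n + 1 := by omega
  have hb' : b < m + 1 := by omega
  simp [tab, List.getD_eq_getElem?_getD, List.getElem?_eq_getElem, ha', hb']

theorem tab_congr (n m : Nat) (f g : Nat → Nat → Int)
    (h : ∀ a, a ≤ n → ∀ b, b ≤ m → f a b = g a b) : tab n m f = tab n m g := by
  unfold tab
  apply List.map_congr_left
  intro a hha
  apply List.map_congr_left
  intro b hhb
  simp only [List.mem_range] at hha hhb
  exact h a (by omega) b (by omega)

theorem convUpd_tab (n m : Nat) (f : Nat → Nat → Int) (a b : Nat) (v : Int)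
    (ha : a ≤ n) (hb : b ≤ m) :
    convUpd (tab n m f) a b v
      = tab n m (fun a' b' => if a' = a ∧ b' = b then v else f a' b') := by
  have ha' : a < n + 1 := by omega
  have hb' : b < m + 1 := by omega
  unfold convUpd
  have hrow : (tab n m f).getD a [] = (List.range (m + 1)).map (f a) := by
    simp [tab, List.getD_eq_getElem?_getD, List.getElem?_eq_getElem, ha']
  rw [hrow]
  unfold tab
  apply List.ext_getElem
  · simp
  · intro i h1 h2
    simp only [List.getElem_set, List.getElem_map, List.getElem_range]
    by_cases hia : i = a
    · subst hia
      apply List.ext_getElem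
      · simp
      · intro j h3 h4
        simp only [eq_self_iff_true, if_true, true_and, List.getElem_set, List.getElem_map,
          List.getElem_range]
        rcases eq_or_ne b j with h | h
        · subst h; rfl
        · rw [if_neg h, if_neg (Ne.symm h)]
    · rw [if_neg (fun hh => hia hh.symm)]
      apply List.map_congr_left
      intro j hj
      simp [hia]

theorem pr_zero (xs ys : List Char) (i b : Nat) : Pr xs ys i 0 b = false := by
  simp [Pr]

theorem pr_final (xs ys : List Char) (i b : Nat) (hb : b ≤ ys.length) :
    Pr xs ys i (ys.length + 1) b = Rb xs ys (i + 1) b := by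
  unfold Pr
  rw [show Rb xs ys (i+1) b =
    ((decide (1 ≤ b) && decide (b - 1 < ys.length)
      && (PySem.Chars.upperChar (xs.getD i ' ') == ys.getD (b - 1) ' ') && Rb xs ys i (b - 1))
    || (!PySem.Chars.isupper (xs.getD i ' ') && Rb xs ys i b)) from rfl]
  have h1 : decide (b - 1 < ys.length + 1) = true := by simp only [decide_eq_true_eq, decide_eq_false_iff_not]; omega
  have h2 : decide (b < ys.length + 1) = true := by simp only [decide_eq_true_eq, decide_eq_false_iff_not]; omega
  rw [h1, h2]
  cases (decide (1 ≤ b)) <;> cases (decide (b - 1 < ys.length)) <;>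
    cases (PySem.Chars.upperChar (xs.getD i ' ') == ys.getD (b - 1) ' ') <;>
    cases Rb xs ys i (b - 1) <;> cases (!PySem.Chars.isupper (xs.getD i ' ')) <;>
    cases Rb xs ys i b <;> rfl

-- Pr at threshold t+1, decomposed into Pr at t plus the two writes made at column t
theorem Pr_succ (xs ys : List Char) (i t b : Nat) :
    Pr xs ys i (t + 1) b =
      (Pr xs ys i t b
       || (decide (b = t + 1) && decide (t < ys.length)
            && (PySem.Chars.upperChar (xs.getD i ' ') == ys.getD t ' ') && Rb xs ys i t)
       || (decide (b = t) && !PySem.Chars.isupper (xs.getD i ' ') && Rb xs ys i t)) := by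
  unfold Pr
  by_cases hb1 : b = t + 1
  · subst hb1
    have e1 : t + 1 - 1 = t := by omega
    have e2 : decide (t < t) = false := by simp
    have e3 : decide (t + 1 < t) = false := by simp only [decide_eq_true_eq, decide_eq_false_iff_not]; omega
    have e4 : decide (1 ≤ t + 1) = true := by simp
    have e5 : decide (t < t + 1) = true := by simp
    have e6 : decide (t + 1 = t + 1) = true := by simp
    have e7 : decide (t + 1 = t) = false := by simp
    have e8 : decide (t + 1 < t + 1) = false := by simp only [decide_eq_false_iff_not]; omega
    rw [e1, e2, e3, e4, e5, e6, e7, e8]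
    cases decide (t < ys.length) <;>
      cases (PySem.Chars.upperChar (xs.getD i ' ') == ys.getD t ' ') <;>
      cases Rb xs ys i t <;> rfl
  · by_cases hb2 : b = t
    · subst hb2
      have e2 : decide (b < b + 1) = true := by simp only [decide_eq_true_eq]; omega
      have e3 : decide (b < b) = false := by simp only [decide_eq_false_iff_not]; omega
      have e4 : decide (b = b + 1) = false := by simp only [decide_eq_false_iff_not]; omega
      have e5 : decide (b = b) = true := by simp only [decide_eq_true_eq]
      by_cases h0 : 1 ≤ b
      · have e0 : decide (1 ≤ b) = true := by simp [h0]
        have e1 : decide (b - 1 < b + 1) = true := by simp only [decide_eq_true_eq]; omega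
        have e1' : decide (b - 1 < b) = true := by simp only [decide_eq_true_eq]; omega
        rw [e0, e1, e1', e2, e3, e4, e5]
        cases decide (b - 1 < ys.length) <;>
          cases (PySem.Chars.upperChar (xs.getD i ' ') == ys.getD (b - 1) ' ') <;>
          cases Rb xs ys i (b - 1) <;>
          cases (!PySem.Chars.isupper (xs.getD i ' ')) <;>
          cases Rb xs ys i b <;> rfl
      · have hb0 : b = 0 := by omega
        subst hb0
        cases decide ((0:Nat) - 1 < ys.length) <;>
          cases (PySem.Chars.upperChar (xs.getD i ' ') == ys.getD ((0:Nat) - 1) ' ') <;>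
          cases Rb xs ys i ((0:Nat) - 1) <;>
          cases (!PySem.Chars.isupper (xs.getD i ' ')) <;> rfl
    · have e2 : decide (b < t + 1) = decide (b < t) := by
        by_cases h1 : b < t
        · have h2 : decide (b < t + 1) = true := by simp only [decide_eq_true_eq]; omega
          have h3 : decide (b < t) = true := by simp [h1]
          rw [h2, h3]
        · have h2 : decide (b < t + 1) = false := by simp only [decide_eq_false_iff_not]; omega
          have h3 : decide (b < t) = false := by simp only [decide_eq_false_iff_not]; omega
          rw [h2, h3]
      have e4 : decide (b = t + 1) = false := by simp [hb1]
      have e5 : decide (b = t) = false := by simp [hb2]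
      by_cases h0 : 1 ≤ b
      · have e1 : decide (b - 1 < t + 1) = decide (b - 1 < t) := by
          by_cases h1 : b - 1 < t
          · have h2 : decide (b - 1 < t + 1) = true := by simp only [decide_eq_true_eq]; omega
            have h3 : decide (b - 1 < t) = true := by simp [h1]
            rw [h2, h3]
          · have h2 : decide (b - 1 < t + 1) = false := by
              simp only [decide_eq_false_iff_not]; omega
            have h3 : decide (b - 1 < t) = false := by simp only [decide_eq_false_iff_not]; omega
            rw [h2, h3]
        rw [e1, e2, e4, e5]
        cases decide (1 ≤ b) <;> cases decide (b - 1 < t) <;> cases decide (b < t) <;>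
          cases decide (b - 1 < ys.length) <;>
          cases (PySem.Chars.upperChar (xs.getD i ' ') == ys.getD (b - 1) ' ') <;>
          cases Rb xs ys i (b - 1) <;>
          cases decide (t < ys.length) <;>
          cases (PySem.Chars.upperChar (xs.getD i ' ') == ys.getD t ' ') <;>
          cases Rb xs ys i t <;>
          cases (!PySem.Chars.isupper (xs.getD i ' ')) <;>
          cases Rb xs ys i b <;> rfl
      · have h1 : decide (1 ≤ b) = false := by simp only [decide_eq_false_iff_not]; omega
        rw [h1, e2, e4, e5]
        cases decide (b - 1 < t + 1) <;> cases decide (b - 1 < t) <;> cases decide (b < t) <;>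
          cases decide (b - 1 < ys.length) <;>
          cases (PySem.Chars.upperChar (xs.getD i ' ') == ys.getD (b - 1) ' ') <;>
          cases Rb xs ys i (b - 1) <;>
          cases decide (t < ys.length) <;>
          cases (PySem.Chars.upperChar (xs.getD i ' ') == ys.getD t ' ') <;>
          cases Rb xs ys i t <;>
          cases (!PySem.Chars.isupper (xs.getD i ' ')) <;>
          cases Rb xs ys i b <;> rfl

-- one inner-loop step advances the threshold
theorem inner_step (xs ys : List Char) (i t : Nat) (hi : i < xs.length) (ht : t ≤ ys.length) :
    (fun dp j =>
      if (dp.getD i []).getD j 0 ≠ 0 then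
        let dp' := if decide (j < ys.length) && (PySem.Chars.upperChar (xs.getD i ' ') == ys.getD j ' ')
                   then convUpd dp (i + 1) (j + 1) 1 else dp
        if !PySem.Chars.isupper (xs.getD i ' ') then convUpd dp' (i + 1) j 1 else dp'
      else dp) (tab xs.length ys.length (Fst xs ys i t)) t
    = tab xs.length ys.length (Fst xs ys i (t + 1)) := by
  simp only []
  have hread : (((tab xs.length ys.length (Fst xs ys i t)).getD i []).getD t 0)
      = (if Rb xs ys i t then 1 else 0) := by
    rw [getD_tab _ _ _ i t (le_of_lt hi) ht]
    simp [Fst]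
  rw [hread]
  by_cases hR : Rb xs ys i t = true
  · rw [if_pos (by simp [hR])]
    by_cases hM : (decide (t < ys.length) && (PySem.Chars.upperChar (xs.getD i ' ') == ys.getD t ' ')) = true
    · have htm : t < ys.length := by
        have := (Bool.and_eq_true _ _).mp hM
        exact of_decide_eq_true this.1
      have hMe : PySem.Chars.upperChar (xs[i]?.getD ' ') = ys[t]?.getD ' ' := by
        have h := eq_of_beq ((Bool.and_eq_true _ _).mp hM).2
        simpa using h
      rw [if_pos hM]
      rw [convUpd_tab _ _ _ (i+1) (t+1) 1 (by omega) (by omega)]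
      by_cases hL : (!PySem.Chars.isupper (xs.getD i ' ')) = true
      · have hLf : PySem.Chars.isupper (xs[i]?.getD ' ') = false := by simpa using hL
        rw [if_pos hL]
        rw [convUpd_tab _ _ _ (i+1) t 1 (by omega) (by omega)]
        apply tab_congr
        intro a ha b hb
        unfold Fst
        rw [Pr_succ]
        by_cases h1 : a ≤ i
        · rw [if_pos h1, if_neg (by omega : ¬ (a = i + 1 ∧ b = t)),
            if_neg (by omega : ¬ (a = i + 1 ∧ b = t + 1)), if_pos h1]
        · by_cases h2 : a = i + 1
          · rw [if_neg h1, if_neg h1, if_pos h2]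
            by_cases h3 : b = t
            · rw [if_pos ⟨h2, h3⟩]
              simp [h2, h3, hR, hLf]
            · rw [if_neg (by omega : ¬ (a = i + 1 ∧ b = t))]
              by_cases h4 : b = t + 1
              · rw [if_pos ⟨h2, h4⟩]
                simp [h2, h4, htm, hR, hMe, List.getElem?_eq_getElem]
              · rw [if_neg (by omega : ¬ (a = i + 1 ∧ b = t + 1)), if_pos h2]
                simp [h2, h3, h4]
          · rw [if_neg (by omega : ¬ (a = i + 1 ∧ b = t)),
              if_neg (by omega : ¬ (a = i + 1 ∧ b = t + 1)),
              if_neg h1, if_neg h1, if_neg h2, if_neg h2]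
      · have hLt : PySem.Chars.isupper (xs[i]?.getD ' ') = true := by
          rcases hLe : PySem.Chars.isupper (xs.getD i ' ') with _ | _
          · exact absurd (by rw [hLe]; rfl) hL
          · simpa using hLe
        rw [if_neg hL]
        apply tab_congr
        intro a ha b hb
        unfold Fst
        rw [Pr_succ]
        by_cases h1 : a ≤ i
        · rw [if_neg (by omega : ¬ (a = i + 1 ∧ b = t + 1)), if_pos h1, if_pos h1]
        · by_cases h2 : a = i + 1
          · rw [if_neg h1, if_neg h1, if_pos h2, if_pos h2]
            by_cases h4 : b = t + 1
            · rw [if_pos ⟨h2, h4⟩]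
              simp [h2, h4, htm, hR, hMe, List.getElem?_eq_getElem]
            · rw [if_neg (by omega : ¬ (a = i + 1 ∧ b = t + 1))]
              simp [h2, h4, hLt, hR, htm, hMe, List.getElem?_eq_getElem]
          · rw [if_neg (by omega : ¬ (a = i + 1 ∧ b = t + 1)),
              if_neg h1, if_neg h1, if_neg h2, if_neg h2]
    · rw [if_neg hM]
      by_cases hL : (!PySem.Chars.isupper (xs.getD i ' ')) = true
      · have hLf : PySem.Chars.isupper (xs[i]?.getD ' ') = false := by simpa using hL
        rw [if_pos hL]
        rw [convUpd_tab _ _ _ (i+1) t 1 (by omega) (by omega)]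
        apply tab_congr
        intro a ha b hb
        unfold Fst
        rw [Pr_succ]
        by_cases h1 : a ≤ i
        · rw [if_neg (by omega : ¬ (a = i + 1 ∧ b = t)), if_pos h1, if_pos h1]
        · by_cases h2 : a = i + 1
          · rw [if_neg h1, if_neg h1, if_pos h2, if_pos h2]
            have hM' := hM
            by_cases h3 : b = t
            · rw [if_pos ⟨h2, h3⟩]
              simp [h2, h3, hR, hLf]
            · rw [if_neg (by omega : ¬ (a = i + 1 ∧ b = t))]
              by_cases h4 : b = t + 1
              · simp only [h4]
                cases hd : decide (t < ys.length) <;>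
                  cases hu : (PySem.Chars.upperChar (xs.getD i ' ') == ys.getD t ' ') <;>
                  simp_all
              · simp [h2, h3, h4]
          · rw [if_neg (by omega : ¬ (a = i + 1 ∧ b = t)),
              if_neg h1, if_neg h1, if_neg h2, if_neg h2]
      · have hLt : PySem.Chars.isupper (xs[i]?.getD ' ') = true := by
          rcases hLe : PySem.Chars.isupper (xs.getD i ' ') with _ | _
          · exact absurd (by rw [hLe]; rfl) hL
          · simpa using hLe
        rw [if_neg hL]
        apply tab_congr
        intro a ha b hb
        unfold Fst
        rw [Pr_succ]
        by_cases h1 : a ≤ i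
        · rw [if_pos h1, if_pos h1]
        · by_cases h2 : a = i + 1
          · rw [if_neg h1, if_neg h1, if_pos h2, if_pos h2]
            by_cases h4 : b = t + 1
            · simp only [h4]
              cases hd : decide (t < ys.length) <;>
                cases hu : (PySem.Chars.upperChar (xs.getD i ' ') == ys.getD t ' ') <;>
                simp_all
            · simp [h4, hLt]
          · rw [if_neg h1, if_neg h1, if_neg h2, if_neg h2]
  · have hR' : Rb xs ys i t = false := by
      cases h : Rb xs ys i t
      · rfl
      · exact absurd h hR
    rw [if_neg (by simp [hR'])]
    apply tab_congr
    intro a ha b hb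
    unfold Fst
    rw [Pr_succ]
    by_cases h1 : a ≤ i
    · rw [if_pos h1, if_pos h1]
    · by_cases h2 : a = i + 1
      · rw [if_neg h1, if_neg h1, if_pos h2, if_pos h2]
        simp [hR']
      · rw [if_neg h1, if_neg h1, if_neg h2, if_neg h2]

theorem inner_loop (xs ys : List Char) (i : Nat) (hi : i < xs.length) :
    (List.range (ys.length + 1)).foldl (fun dp j =>
      if (dp.getD i []).getD j 0 ≠ 0 then
        let dp' := if decide (j < ys.length) && (PySem.Chars.upperChar (xs.getD i ' ') == ys.getD j ' ')
                   then convUpd dp (i + 1) (j + 1) 1 else dp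
        if !PySem.Chars.isupper (xs.getD i ' ') then convUpd dp' (i + 1) j 1 else dp'
      else dp) (tab xs.length ys.length (Fst xs ys i 0))
    = tab xs.length ys.length (Fst xs ys (i + 1) 0) := by
  have main : ∀ t, t ≤ ys.length + 1 →
      (List.range t).foldl (fun dp j =>
        if (dp.getD i []).getD j 0 ≠ 0 then
          let dp' := if decide (j < ys.length) && (PySem.Chars.upperChar (xs.getD i ' ') == ys.getD j ' ')
                     then convUpd dp (i + 1) (j + 1) 1 else dp
          if !PySem.Chars.isupper (xs.getD i ' ') then convUpd dp' (i + 1) j 1 else dp'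
        else dp) (tab xs.length ys.length (Fst xs ys i 0))
      = tab xs.length ys.length (Fst xs ys i t) := by
    intro t
    induction t with
    | zero => intro _; simp
    | succ t' ih =>
      intro ht
      rw [List.range_succ, List.foldl_append, ih (by omega)]
      simp only [List.foldl_cons, List.foldl_nil]
      exact inner_step xs ys i t' hi (by omega)
  rw [main (ys.length + 1) (le_refl _)]
  apply tab_congr
  intro a ha b hb
  unfold Fst
  by_cases h1 : a ≤ i
  · rw [if_pos h1, if_pos (by omega : a ≤ i + 1)]
  · by_cases h2 : a = i + 1
    · rw [if_neg h1, if_pos h2, if_pos (by omega : a ≤ i + 1)]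
      rw [pr_final xs ys i b hb, h2]
    · rw [if_neg h1, if_neg h2, if_neg (by omega : ¬ a ≤ i + 1)]
      by_cases h3 : a = i + 1 + 1
      · rw [if_pos h3, pr_zero]
        rfl
      · rw [if_neg h3]

theorem outer_loop (xs ys : List Char) :
    (List.range xs.length).foldl (fun dp i =>
      (List.range (ys.length + 1)).foldl (fun dp j =>
        if (dp.getD i []).getD j 0 ≠ 0 then
          let dp' := if decide (j < ys.length) && (PySem.Chars.upperChar (xs.getD i ' ') == ys.getD j ' ')
                     then convUpd dp (i + 1) (j + 1) 1 else dp
          if !PySem.Chars.isupper (xs.getD i ' ') then convUpd dp' (i + 1) j 1 else dp'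
        else dp) dp) (tab xs.length ys.length (Fst xs ys 0 0))
    = tab xs.length ys.length (Fst xs ys xs.length 0) := by
  have main : ∀ k, k ≤ xs.length →
      (List.range k).foldl (fun dp i =>
        (List.range (ys.length + 1)).foldl (fun dp j =>
          if (dp.getD i []).getD j 0 ≠ 0 then
            let dp' := if decide (j < ys.length) && (PySem.Chars.upperChar (xs.getD i ' ') == ys.getD j ' ')
                       then convUpd dp (i + 1) (j + 1) 1 else dp
            if !PySem.Chars.isupper (xs.getD i ' ') then convUpd dp' (i + 1) j 1 else dp'
          else dp) dp) (tab xs.length ys.length (Fst xs ys 0 0))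
      = tab xs.length ys.length (Fst xs ys k 0) := by
    intro k
    induction k with
    | zero => intro _; simp
    | succ k' ih =>
      intro hk
      rw [show List.range (k' + 1) = List.range k' ++ [k'] from List.range_succ,
        List.foldl_append, ih (by omega)]
      simp only [List.foldl_cons, List.foldl_nil]
      exact inner_loop xs ys k' (by omega)
  exact main xs.length (le_refl _)

theorem init_tab (xs ys : List Char) :
    convUpd (List.replicate (xs.length + 1) (List.replicate (ys.length + 1) (0 : Int))) 0 0 1
      = tab xs.length ys.length (Fst xs ys 0 0) := by
  have hrep : List.replicate (xs.length + 1) (List.replicate (ys.length + 1) (0 : Int))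
      = tab xs.length ys.length (fun _ _ => 0) := by
    unfold tab
    apply List.ext_getElem
    · simp
    · intro a h1 h2
      simp only [List.getElem_replicate, List.getElem_map, List.getElem_range]
      apply List.ext_getElem
      · simp
      · intro b h3 h4
        simp
  rw [hrep, convUpd_tab _ _ _ 0 0 1 (by omega) (by omega)]
  apply tab_congr
  intro a ha b hb
  unfold Fst
  by_cases h1 : a = 0
  · subst h1
    by_cases h2 : b = 0
    · subst h2; simp [Rb]
    · rw [if_neg (by omega : ¬ ((0:Nat) = 0 ∧ b = 0)), if_pos (le_refl 0)]
      simp [Rb, h2]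
  · rw [if_neg (by omega : ¬ (a = 0 ∧ b = 0)), if_neg (by omega : ¬ a ≤ 0)]
    by_cases h3 : a = 0 + 1
    · rw [if_pos h3, pr_zero]
      rfl
    · rw [if_neg h3]

theorem a_eq_Rb (X Y : String) :
    stringConversion X Y = (if Rb X.toList Y.toList X.toList.length Y.toList.length then 1 else 0) := by
  unfold stringConversion
  simp only []
  rw [init_tab, outer_loop, getD_tab _ _ _ _ _ (le_refl _) (le_refl _)]
  simp [Fst]

-- bridge: reachability of (i, j) plus suffix-convertibility from (i, j) ⟺ whole-string answer
theorem bridge (xs ys : List Char) (i : Nat) (hi : i ≤ xs.length) :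
    ((∃ j, j ≤ ys.length ∧ Rb xs ys i j = true ∧ altF (xs.drop i) (ys.drop j) = true)
      ↔ altF xs ys = true) := by
  induction i with
  | zero =>
    constructor
    · rintro ⟨j, _, hR, hA⟩
      have hj0 : j = 0 := by simpa [Rb] using hR
      subst hj0
      simpa using hA
    · intro h
      exact ⟨0, by omega, by simp [Rb], by simpa using h⟩
  | succ i' ih =>
    have hi' : i' ≤ xs.length := by omega
    have hlt : i' < xs.length := by omega
    rw [← ih hi']
    have hdropx : xs.drop i' = xs.getD i' ' ' :: xs.drop (i' + 1) := by
      rw [List.getD_eq_getElem _ _ hlt, List.drop_eq_getElem_cons hlt]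
    constructor
    · rintro ⟨j, hj, hR, hA⟩
      rw [Rb] at hR
      rcases (Bool.or_eq_true _ _).mp hR with h | h
      · obtain ⟨⟨⟨h1, h2⟩, h3⟩, h4⟩ := by
          simpa only [Bool.and_eq_true] using h
        have hj1 : 1 ≤ j := of_decide_eq_true h1
        have hj2 : j - 1 < ys.length := of_decide_eq_true h2
        refine ⟨j - 1, by omega, h4, ?_⟩
        rw [hdropx]
        have hdropy : ys.drop (j - 1) = ys.getD (j - 1) ' ' :: ys.drop j := by
          have e : j - 1 + 1 = j := by omega
          have h := List.drop_eq_getElem_cons hj2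
          rw [e] at h
          rw [List.getD_eq_getElem _ _ hj2]
          exact h
        rw [hdropy]
        simp only [altF]
        simp only [Bool.or_eq_true, Bool.and_eq_true]
        exact Or.inl ⟨h3, hA⟩
      · obtain ⟨h1, h2⟩ := (Bool.and_eq_true _ _).mp h
        refine ⟨j, hj, h2, ?_⟩
        rw [hdropx]
        simp only [altF, Bool.or_eq_true, Bool.and_eq_true]
        right
        exact ⟨h1, hA⟩
    · rintro ⟨j, hj, hR, hA⟩
      rw [hdropx] at hA
      simp only [altF, Bool.or_eq_true, Bool.and_eq_true] at hA
      rcases hA with hA | hA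
      · rcases hdy : ys.drop j with _ | ⟨d, ys''⟩
        · rw [hdy] at hA
          have hA' : false = true := hA
          cases hA'
        · rw [hdy] at hA
          have hA' : ((PySem.Chars.upperChar (xs.getD i' ' ') == d)
              && altF (xs.drop (i' + 1)) ys'') = true := hA
          obtain ⟨hA1, hA2⟩ := (Bool.and_eq_true _ _).mp hA'
          have hjlt : j < ys.length := by
            by_contra hcon
            have hnil : ys.drop j = [] := List.drop_eq_nil_of_le (by omega)
            rw [hnil] at hdy; cases hdy
          have h0 := List.drop_eq_getElem_cons hjlt
          rw [hdy] at h0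
          injection h0 with hd hys''
          refine ⟨j + 1, by omega, ?_, by rw [← hys'']; exact hA2⟩
          rw [Rb]
          simp only [Bool.or_eq_true, Bool.and_eq_true]
          left
          refine ⟨⟨⟨by simp, by simp only [decide_eq_true_eq]; omega⟩, ?_⟩, hR⟩
          have he : j + 1 - 1 = j := by omega
          rw [he, List.getD_eq_getElem _ _ hjlt, ← hd]
          exact hA1
      · refine ⟨j, hj, ?_, hA.2⟩
        rw [Rb]
        simp only [Bool.or_eq_true, Bool.and_eq_true]
        right
        exact ⟨hA.1, hR⟩

theorem Rb_eq_altF (xs ys : List Char) :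
    Rb xs ys xs.length ys.length = altF xs ys := by
  have h := bridge xs ys xs.length (le_refl _)
  rcases hA : altF xs ys
  · rcases hR : Rb xs ys xs.length ys.length
    · rfl
    · exfalso
      have : altF xs ys = true := h.mp ⟨ys.length, le_refl _, hR, by simp [altF]⟩
      rw [hA] at this; cases this
  · obtain ⟨j, hj, hR, hA'⟩ := h.mpr hA
    have hj' : j = ys.length := by
      by_contra hcon
      have hjlt : j < ys.length := by omega
      have : ys.drop j ≠ [] := by
        intro hnil
        have := List.drop_eq_nil_iff.mp hnil
        omega
      rcases hdy : ys.drop j with _ | ⟨d, ys''⟩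
      · exact this hdy
      · rw [hdy] at hA'
        simp [altF] at hA'
    subst hj'
    rw [hR]

-- B's recursion computes the suffix-convertibility predicate altF
theorem bRec_eq_altF (ys : List Char) (xs : List Char) :
    ∀ j, j ≤ ys.length → bRec ys xs j = (if altF xs (ys.drop j) then 1 else 0) := by
  induction xs with
  | nil =>
    intro j hj
    simp only [bRec, altF]
    by_cases h : j = ys.length
    · subst h
      simp [List.drop_eq_nil_of_le (le_refl ys.length)]
    · have hlt : j < ys.length := by omega
      have hne : ys.drop j ≠ [] := by
        intro hnil
        have := List.drop_eq_nil_iff.mp hnil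
        omega
      rcases hdy : ys.drop j with _ | ⟨d, ys''⟩
      · exact absurd hdy hne
      · simp [h, hdy]
  | cons c xs' ih =>
    intro j hj
    simp only [bRec]
    by_cases hjm : j < ys.length
    · have hdropy : ys.drop j = ys.getD j ' ' :: ys.drop (j + 1) := by
        rw [List.getD_eq_getElem _ _ hjm, List.drop_eq_getElem_cons hjm]
      have hdec : decide (j < ys.length) = true := by simp [hjm]
      rw [hdec, ih (j + 1) (by omega), ih j hj, hdropy]
      simp only [altF, ← hdropy]
      cases (PySem.Chars.upperChar c == ys.getD j ' ') <;>
        cases altF xs' (ys.drop (j + 1)) <;>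
        cases (PySem.Chars.isupper c) <;>
        cases altF xs' (ys.drop j) <;> simp
    · have hje : j = ys.length := by omega
      subst hje
      have hnil : ys.drop ys.length = [] := List.drop_eq_nil_of_le (le_refl _)
      have hdec : decide (ys.length < ys.length) = false := by simp
      rw [hdec, ih ys.length (le_refl _), hnil]
      simp only [altF, Bool.false_and, ← hnil]
      cases (PySem.Chars.isupper c) <;> cases altF xs' (ys.drop ys.length) <;> simp

theorem b_eq_altF (X Y : String) :
    stringConversion_alt X Y = (if altF X.toList Y.toList then 1 else 0) := by
  unfold stringConversion_alt
  rw [bRec_eq_altF Y.toList X.toList 0 (by omega)]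
  simp

-- ===== VERDICT (by name: the statement is the Claim_ definition above) =====
theorem stringConversion_spec : Claim_equal_stringConversion := by
  intro X Y _
  unfold Spec_stringConversion
  rw [a_eq_Rb, Rb_eq_altF, ← b_eq_altF]
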